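-- pv_equiv track=rewrite | github.com/leonardoPiano/VideoBrain-ThumbnailExtractor | VideoBrain/scene_thumbnail_processor.py | getOnlyNFramesFaces
-- ===== SOURCE A (Python) =====
-- def getOnlyNFramesFaces(best_frames,n):
--     while len(best_frames)>n:
--
--          predictions=best_frames[0]['predictions']
--          #min_area=(predictions[0]['area'])
--          max_area=0
--          frame_id=0
--          counter=0
--          for frame in best_frames:
--              predictions= frame['predictions']
--
--              for prediction in predictions:
--                  if(prediction['area']>max_area):
--                      max_area=prediction['area']
--                      frame_id=counter
--              counter+=1
--          del best_frames[frame_id]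
--
--     return best_frames
-- ===== SOURCE B (Python) =====
-- # Sort-based selection instead of repeated rescanning: score every frame once
-- # (its largest positive face area, 0 if none), sort the frame indices by
-- # descending score (ties keep earlier frames first, removed first), drop the
-- # top len-n indices and keep the rest in original order.
-- # Like the original, mutates best_frames in place and returns it.
-- def getOnlyNFramesFaces(best_frames, n):
--     k = len(best_frames) - n
--     if k > 0:
--         scores = [max([0] + [p['area'] for p in f['predictions']])
--                   for f in best_frames]
--         order = sorted(range(len(best_frames)), key=lambda i: -scores[i])
--         drop = set(order[:k])
--         best_frames[:] = [best_frames[i] for i in range(len(best_frames))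
--                           if i not in drop]
--     return best_frames
-- ===== Notes on version B (the rewrite author's own statement) =====
-- stated objective: alternative
-- what changed: A repeatedly rescans every prediction of every frame and deletes the current worst frame, one full scan per deletion; B scores each frame once, sorts the frame indices by descending score (stable sort keeps A's earlier-frame-first tie order), drops the top len-n indices and keeps the rest in one pass; Pre_ excludes only inputs where A raises (n < 0 via IndexError, missing 'predictions'/'area' keys via KeyError) and duplicate-key association lists, which represent no Python dict.
import Mathlib
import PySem

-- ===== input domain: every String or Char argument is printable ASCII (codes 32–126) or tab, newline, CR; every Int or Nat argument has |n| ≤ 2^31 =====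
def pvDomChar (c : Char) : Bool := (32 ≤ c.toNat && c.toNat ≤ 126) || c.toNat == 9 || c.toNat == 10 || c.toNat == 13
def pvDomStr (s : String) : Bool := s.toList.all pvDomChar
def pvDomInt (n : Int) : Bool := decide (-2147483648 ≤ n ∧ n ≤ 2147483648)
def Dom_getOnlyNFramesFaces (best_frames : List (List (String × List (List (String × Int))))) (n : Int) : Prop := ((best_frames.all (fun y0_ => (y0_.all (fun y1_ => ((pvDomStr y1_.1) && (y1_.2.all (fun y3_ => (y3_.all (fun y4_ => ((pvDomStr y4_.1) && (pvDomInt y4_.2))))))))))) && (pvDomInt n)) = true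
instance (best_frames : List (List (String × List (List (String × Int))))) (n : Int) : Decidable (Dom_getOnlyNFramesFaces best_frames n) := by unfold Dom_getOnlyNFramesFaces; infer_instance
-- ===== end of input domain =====

-- B replaces A's repeated full rescans with: score every frame once, sort the indices
-- by descending score (stable, so tied earlier frames are dropped first), drop the top
-- len-n and keep the rest in order. Both mutate best_frames in place in Python; the
-- equivalence proved here is about the return value.


-- ===== PORT A =====
-- frame['predictions'] / prediction['area']; Pre_ guarantees the keys exist, so the
-- .getD defaults are never reached on admitted inputs.
def pvPreds (frame : List (String × List (List (String × Int)))) : List (List (String × Int)) :=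
  (PySem.Dict.get? (PySem.Dict.mk frame) "predictions").getD []

def pvArea (pred : List (String × Int)) : Int :=
  (PySem.Dict.get? (PySem.Dict.mk pred) "area").getD 0

-- A's inner double loop: state (max_area, frame_id, counter), init (0, 0, 0)
def pvAScan (bf : List (List (String × List (List (String × Int))))) : Int × Int × Int :=
  bf.foldl (fun st frame =>
    let st2 := (pvPreds frame).foldl
      (fun s pred => if pvArea pred > s.1 then (pvArea pred, s.2.2, s.2.2) else s) st
    (st2.1, st2.2.1, st2.2.2 + 1)) (0, 0, 0)

-- A's while loop; fuel = initial length suffices since Pre_ gives 0 ≤ n.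
-- Python reads best_frames[0]['predictions'] into a variable it never uses (_preds0);
-- it raises only for empty best_frames (n < 0), which Pre_ excludes.
def pvALoop : Nat → List (List (String × List (List (String × Int)))) → Int →
    List (List (String × List (List (String × Int))))
  | 0, bf, _ => bf
  | fuel+1, bf, n =>
    if n < (bf.length : Int) then
      let _preds0 := pvPreds ((PySem.List.pyGet? bf 0).getD [])
      pvALoop fuel (bf.eraseIdx (pvAScan bf).2.1.toNat) n
    else bf

def getOnlyNFramesFaces (best_frames : List (List (String × List (List (String × Int))))) (n : Int) :
    List (List (String × List (List (String × Int)))) :=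
  pvALoop best_frames.length best_frames n

-- ===== PORT B =====
-- max([0] + [p['area'] for p in f['predictions']])
def pvScore (f : List (String × List (List (String × Int)))) : Int :=
  (PySem.List.max? ((0 : Int) :: (pvPreds f).map pvArea) (fun y => y)).getD 0

-- key=lambda i: -scores[i]
def pvKey (scores : List Int) (i : Int) : Int := -((PySem.List.pyGet? scores i).getD 0)

def getOnlyNFramesFaces_alt (best_frames : List (List (String × List (List (String × Int))))) (n : Int) :
    List (List (String × List (List (String × Int)))) :=
  let k : Int := (best_frames.length : Int) - n
  if 0 < k then
    let scores := best_frames.map pvScore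
    let order := PySem.List.sorted (PySem.List.pyRange 0 (best_frames.length : Int) 1) (pvKey scores) false
    let drop := PySem.Set.ofList (order.take k.toNat)
    ((PySem.List.pyRange 0 (best_frames.length : Int) 1).filter
        (fun i => !(PySem.Set.contains drop i))).map
      (fun i => (PySem.List.pyGet? best_frames i).getD [])
  else best_frames

-- ===== PRECONDITION & SPEC =====
-- Pre_ excludes exactly the inputs where the Python A raises: n < 0 (the loop empties
-- the list and best_frames[0] raises IndexError) and, when the loop runs at all
-- (len > n), frames without a 'predictions' key or predictions without an 'area' key
-- (KeyError); association lists with duplicate keys are also excluded since they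
-- represent no Python dict.
def Pre_getOnlyNFramesFaces (best_frames : List (List (String × List (List (String × Int))))) (n : Int) : Prop :=
  0 ≤ n ∧ ((best_frames.length : Int) ≤ n ∨
    ∀ f ∈ best_frames, (f.map Prod.fst).Nodup ∧
      (PySem.Dict.get? (PySem.Dict.mk f) "predictions").isSome ∧
      ∀ p ∈ ((PySem.Dict.get? (PySem.Dict.mk f) "predictions").getD []),
        (p.map Prod.fst).Nodup ∧ (PySem.Dict.get? (PySem.Dict.mk p) "area").isSome)

instance (best_frames : List (List (String × List (List (String × Int))))) (n : Int) :
    Decidable (Pre_getOnlyNFramesFaces best_frames n) := by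
  unfold Pre_getOnlyNFramesFaces; infer_instance

def pvWitness_getOnlyNFramesFaces : (List (List (String × List (List (String × Int))))) × Int :=
  ([[("predictions", [[("area", 5)], [("area", 2)]])], [("predictions", [])]], 1)

def Spec_getOnlyNFramesFaces (best_frames : List (List (String × List (List (String × Int))))) (n : Int)
    (out : List (List (String × List (List (String × Int))))) : Prop :=
  out = getOnlyNFramesFaces_alt best_frames n

instance (best_frames : List (List (String × List (List (String × Int))))) (n : Int)
    (out : List (List (String × List (List (String × Int))))) :
    Decidable (Spec_getOnlyNFramesFaces best_frames n out) := by
  unfold Spec_getOnlyNFramesFaces; infer_instance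

-- ===== CLAIM =====
def Claim_equal_getOnlyNFramesFaces : Prop :=
  ∀ (best_frames : List (List (String × List (List (String × Int))))) (n : Int),
    Dom_getOnlyNFramesFaces best_frames n → Pre_getOnlyNFramesFaces best_frames n →
      Spec_getOnlyNFramesFaces best_frames n (getOnlyNFramesFaces best_frames n)

-- ===== LEMMAS AND PROOFS =====

-- ---- proof-layer notions ----
-- clamped per-frame score and score-by-original-index
def pvC (f : List (String × List (List (String × Int)))) : Int :=
  ((pvPreds f).map pvArea).foldl max 0

def pvG (bf : List (List (String × List (List (String × Int))))) (j : Nat) :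
    List (String × List (List (String × Int))) := bf.getD j []

def pvS (bf : List (List (String × List (List (String × Int))))) (j : Nat) : Int := pvC (pvG bf j)

-- relative position of the last running-max update of A's scan (none = no update)
def pvSel : List Int → Int → Option Nat
  | [], _ => none
  | a :: t, m =>
    if m < a then
      match pvSel t a with
      | some j => some (j + 1)
      | none => some 0
    else (pvSel t m).map (· + 1)

def pvPos (cs : List Int) : Nat := (pvSel cs 0).getD 0

-- "j is removed before i": higher score, or equal score and earlier position
def pvPrio (s : Nat → Int) (j i : Nat) : Bool := decide (s i < s j ∨ (s j = s i ∧ j < i))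

def pvRank (s : Nat → Int) (L i : Nat) : Nat :=
  (List.range L).countP (fun j => pvPrio s j i)

-- A's process on original indices
def pvAiter (s : Nat → Int) : Nat → List Nat → List Nat
  | 0, l => l
  | k+1, l => pvAiter s k (l.eraseIdx (pvPos (l.map s)))

-- -------- basic facts --------
theorem pvScore_eq_pvC (f : List (String × List (List (String × Int)))) : pvScore f = pvC f := by
  simp [pvScore, pvC, PySem.List.max?_id_cons]

theorem pvC_nonneg (f : List (String × List (List (String × Int)))) : 0 ≤ pvC f :=
  (PySem.List.le_foldl_max _ _).1

theorem pvS_nonneg (bf : List (List (String × List (List (String × Int))))) (j : Nat) :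
    0 ≤ pvS bf j := pvC_nonneg _

-- -------- A's scan --------
theorem pvInner (preds : List (List (String × Int))) (m fid ctr : Int) :
    preds.foldl (fun s pred => if pvArea pred > s.1 then (pvArea pred, s.2.2, s.2.2) else s)
        (m, fid, ctr)
      = ((preds.map pvArea).foldl max m,
         (if m < (preds.map pvArea).foldl max m then ctr else fid), ctr) := by
  induction preds generalizing m fid with
  | nil => simp
  | cons p t ih =>
    simp only [List.foldl_cons, List.map_cons]
    by_cases h : pvArea p > m
    · rw [if_pos h, ih]
      have h1 : max m (pvArea p) = pvArea p := max_eq_right h.le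
      have h2 : pvArea p ≤ (t.map pvArea).foldl max (pvArea p) := (PySem.List.le_foldl_max _ _).1
      have h3 : m < (t.map pvArea).foldl max (pvArea p) := lt_of_lt_of_le h h2
      simp [h1, h3]
    · rw [if_neg h, ih]
      have h1 : max m (pvArea p) = m := max_eq_left (not_lt.mp h)
      simp [h1]

theorem pvScan_aux (bf : List (List (String × List (List (String × Int))))) (m fid ctr : Int)
    (hm : 0 ≤ m) :
    bf.foldl (fun st frame =>
        let st2 := (pvPreds frame).foldl
          (fun s pred => if pvArea pred > s.1 then (pvArea pred, s.2.2, s.2.2) else s) st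
        (st2.1, st2.2.1, st2.2.2 + 1)) (m, fid, ctr)
      = ((bf.map pvC).foldl max m,
         (pvSel (bf.map pvC) m).elim fid (fun j => ctr + (j : Int)),
         ctr + bf.length) := by
  induction bf generalizing m fid ctr with
  | nil => simp [pvSel]
  | cons f t ih =>
    simp only [List.foldl_cons, List.map_cons]
    rw [pvInner]
    have hA : ((pvPreds f).map pvArea).foldl max m = max m (pvC f) := by
      have h0 : max m (0 : Int) = m := max_eq_left hm
      rw [pvC]
      conv_lhs => rw [← h0]
      exact List.foldl_assoc
    simp only [hA]
    rw [ih (max m (pvC f)) _ (ctr + 1) (le_trans hm (le_max_left _ _))]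
    by_cases hmc : m < pvC f
    · have hmx : max m (pvC f) = pvC f := max_eq_right hmc.le
      rw [hmx, pvSel]
      rw [if_pos hmc]
      cases hs : pvSel (t.map pvC) (pvC f) with
      | none => simp [hmc]; omega
      | some j => simp [hmc]; omega
    · have hmx : max m (pvC f) = m := max_eq_left (not_lt.mp hmc)
      rw [hmx, pvSel, if_neg hmc]
      cases hs : pvSel (t.map pvC) m with
      | none => simp; omega
      | some j => simp; omega

theorem pvAScan_eq (bf : List (List (String × List (List (String × Int))))) :
    pvAScan bf = ((bf.map pvC).foldl max 0, ((pvPos (bf.map pvC) : Nat) : Int), (bf.length : Int)) := by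
  rw [pvAScan, pvScan_aux bf 0 0 0 le_rfl]
  cases hs : pvSel (bf.map pvC) 0 <;> simp [pvPos, hs]

-- -------- pvSel properties --------
theorem pvSel_none {cs : List Int} {m : Int} (h : pvSel cs m = none) :
    ∀ i (hi : i < cs.length), cs[i] ≤ m := by
  induction cs generalizing m with
  | nil => intro i hi; simp at hi
  | cons a t ih =>
    rw [pvSel] at h
    by_cases hma : m < a
    · rw [if_pos hma] at h
      cases hs : pvSel t a <;> simp [hs] at h
    · rw [if_neg hma] at h
      simp only [Option.map_eq_none_iff] at h
      intro i hi
      cases i with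
      | zero => simpa using not_lt.mp hma
      | succ i' => exact ih h i' (by simpa using hi)

theorem pvSel_some {cs : List Int} {m : Int} {j : Nat} (h : pvSel cs m = some j) :
    ∃ hj : j < cs.length, m < cs[j] ∧
      ∀ i (hi : i < cs.length), cs[i] ≤ cs[j] ∧ (i < j → cs[i] < cs[j]) := by
  induction cs generalizing m j with
  | nil => rw [pvSel] at h; simp at h
  | cons a t ih =>
    rw [pvSel] at h
    by_cases hma : m < a
    · rw [if_pos hma] at h
      cases hs : pvSel t a with
      | none =>
        rw [hs] at h
        simp only [Option.some.injEq] at h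
        subst h
        refine ⟨by simp, by simpa using hma, ?_⟩
        intro i hi
        cases i with
        | zero => simp
        | succ i' =>
          have := pvSel_none hs i' (by simpa using hi)
          simp only [List.getElem_cons_succ, List.getElem_cons_zero]
          exact ⟨this, by omega⟩
      | some j' =>
        rw [hs] at h
        simp only [Option.some.injEq] at h
        subst h
        obtain ⟨hj', hlt, hb⟩ := ih hs
        refine ⟨by simpa using Nat.succ_lt_succ hj', by simpa using hma.trans hlt, ?_⟩
        intro i hi
        cases i with
        | zero =>
          simp only [List.getElem_cons_zero, List.getElem_cons_succ]
          exact ⟨hlt.le, fun _ => hlt⟩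
        | succ i' =>
          have := hb i' (by simpa using hi)
          simpa using ⟨this.1, fun hlt' => this.2 (by omega)⟩
    · rw [if_neg hma] at h
      simp only [Option.map_eq_some_iff] at h
      obtain ⟨j', hs, rfl⟩ := h
      obtain ⟨hj', hlt, hb⟩ := ih hs
      have ham : a ≤ m := not_lt.mp hma
      refine ⟨by simpa using Nat.succ_lt_succ hj', by simpa using hlt, ?_⟩
      intro i hi
      cases i with
      | zero =>
        simp only [List.getElem_cons_zero, List.getElem_cons_succ]
        exact ⟨ham.trans hlt.le, fun _ => lt_of_le_of_lt ham hlt⟩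
      | succ i' =>
        have := hb i' (by simpa using hi)
        simpa using ⟨this.1, fun hlt' => this.2 (by omega)⟩

theorem pvPos_lt {cs : List Int} (h : cs ≠ []) : pvPos cs < cs.length := by
  rw [pvPos]
  cases hs : pvSel cs 0 with
  | none => simpa using List.length_pos_iff.mpr h
  | some j => obtain ⟨hj, -, -⟩ := pvSel_some hs; simpa using hj

theorem pvPos_spec {cs : List Int} (h : cs ≠ []) (h0 : ∀ x ∈ cs, 0 ≤ x) :
    ∀ i (hi : i < cs.length),
      cs[i] ≤ cs[pvPos cs]'(pvPos_lt h) ∧ (i < pvPos cs → cs[i] < cs[pvPos cs]'(pvPos_lt h)) := by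
  intro i hi
  cases hs : pvSel cs 0 with
  | none =>
    have hz : ∀ i' (hi' : i' < cs.length), cs[i'] = 0 := by
      intro i' hi'
      exact le_antisymm (pvSel_none hs i' hi') (h0 _ (List.getElem_mem hi'))
    simp only [pvPos, hs, Option.getD_none]
    constructor
    · rw [hz i hi, hz 0 (List.length_pos_iff.mpr h)]
    · intro hlt; simp at hlt
  | some j =>
    obtain ⟨hj, -, hb⟩ := pvSel_some hs
    simp only [pvPos, hs, Option.getD_some]
    exact hb i hi

-- -------- A's iteration as a rank filter --------
theorem pvAiter_eq (s : Nat → Int) (hs : ∀ i, 0 ≤ s i) :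
    ∀ (k : Nat) (l : List Nat), l.Pairwise (· < ·) → k ≤ l.length →
      pvAiter s k l = l.filter (fun i => decide (k ≤ l.countP (fun j => pvPrio s j i))) := by
  intro k
  induction k with
  | zero => intro l _ _; simp [pvAiter]
  | succ k ih =>
    intro l hp hk
    have hne : l ≠ [] := by intro h; subst h; simp at hk
    have hnd : l.Nodup := hp.imp (fun h => Nat.ne_of_lt h)
    have hcne : l.map s ≠ [] := by simpa using hne
    have hplen : pvPos (l.map s) < l.length := by simpa using pvPos_lt hcne
    set p := pvPos (l.map s) with hpdef
    set m := l[p] with hmdef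
    have hsm : ∀ i (hi : i < l.length), s l[i] ≤ s m ∧ (i < p → s l[i] < s m) := by
      intro i hi
      have := pvPos_spec hcne (by rintro x hx; obtain ⟨j, hj, rfl⟩ := List.mem_map.mp hx; exact hs j)
        i (by simpa using hi)
      simpa using this
    have hmem : m ∈ l := List.getElem_mem hplen
    have hmin : ∀ i ∈ l, i ≠ m → pvPrio s m i = true := by
      intro i hil hne'
      obtain ⟨q, hq, rfl⟩ := List.mem_iff_getElem.mp hil
      have hqp : q ≠ p := by
        intro h
        have hq' : l[q]? = l[p]? := by rw [h]
        rw [List.getElem?_eq_getElem hq, List.getElem?_eq_getElem hplen] at hq'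
        exact hne' (by rw [hmdef]; exact Option.some.inj hq')
      have h1 := hsm q hq
      rcases lt_or_ge (s l[q]) (s m) with hlt | hge
      · simp [pvPrio, hlt]
      · have heq : s l[q] = s m := le_antisymm (h1.1) hge
        have hqgt : p < q := by
          rcases Nat.lt_or_ge q p with h2 | h2
          · exact absurd (h1.2 h2) (by omega)
          · omega
        have : m < l[q] := List.pairwise_iff_getElem.mp hp p q hplen hq hqgt
        simp [pvPrio, heq, this]
    have hrank0 : l.countP (fun j => pvPrio s j m) = 0 := by
      rw [List.countP_eq_zero]
      intro j hjl
      by_cases hjm : j = m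
      · subst hjm; simp [pvPrio]
      · have := hmin j hjl hjm
        simp only [pvPrio, decide_eq_true_eq] at this ⊢
        omega
    have h1 : l.eraseIdx p = l.filter (fun x => x != m) := by
      rw [← List.Nodup.erase_getElem hnd p hplen, List.Nodup.erase_eq_filter hnd]
    rw [pvAiter, ← hpdef, h1, ih]
    · rw [List.filter_filter]
      apply List.filter_congr
      intro i hi
      by_cases him : i = m
      · subst him
        simp [hrank0]
      · have hcount : (l.filter (fun x => x != m)).countP (fun j => pvPrio s j i) + 1
            = l.countP (fun j => pvPrio s j i) := by
          have hperm := List.perm_cons_erase hmem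
          rw [hperm.countP_eq, List.countP_cons, List.Nodup.erase_eq_filter hnd]
          have : pvPrio s m i = true := hmin i hi him
          simp [this]
        have hiff : (k ≤ (l.filter (fun x => x != m)).countP (fun j => pvPrio s j i))
            ↔ (k + 1 ≤ l.countP (fun j => pvPrio s j i)) := by omega
        simp [him, hiff]
    · exact hp.filter _
    · have : (l.filter (fun x => x != m)).length = l.length - 1 := by
        rw [← h1, List.length_eraseIdx, if_pos hplen]
      omega

-- -------- A's loop --------
theorem pvALoop_stop (fuel : Nat) (bf : List (List (String × List (List (String × Int)))))
    (n : Int) (h : ¬ n < (bf.length : Int)) : pvALoop fuel bf n = bf := by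
  cases fuel <;> simp [pvALoop, h]

theorem pvALoop_eq (g : Nat → List (String × List (List (String × Int)))) (n : Int) (hn : 0 ≤ n) :
    ∀ (fuel : Nat) (l : List Nat), l.Pairwise (· < ·) → (l.length : Int) - n ≤ fuel →
      pvALoop fuel (l.map g) n = (pvAiter (fun j => pvC (g j)) (l.length - n.toNat) l).map g := by
  intro fuel
  induction fuel with
  | zero =>
    intro l hp hf
    have : l.length - n.toNat = 0 := by omega
    rw [this]
    simp [pvALoop, pvAiter]
  | succ fuel ih =>
    intro l hp hf
    by_cases hlen : n < ((l.map g).length : Int)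
    · have hlen' : n < (l.length : Int) := by simpa using hlen
      have hne : l ≠ [] := by intro h; subst h; simp at hlen'; omega
      have hmapne : l.map (fun j => pvC (g j)) ≠ [] := by simpa using hne
      have hps : pvPos ((l.map g).map pvC) = pvPos (l.map (fun j => pvC (g j))) := by
        rw [List.map_map]; rfl
      have hplt : pvPos (l.map (fun j => pvC (g j))) < l.length := by
        simpa using pvPos_lt hmapne
      simp only [pvALoop, if_pos hlen]
      rw [pvAScan_eq]
      simp only [hps]
      rw [Int.toNat_natCast, List.eraseIdx_map, ih]
      · have hklen : l.length - n.toNat = ((l.eraseIdx (pvPos (l.map fun j => pvC (g j)))).length - n.toNat) + 1 := by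
          rw [List.length_eraseIdx, if_pos hplt]; omega
        rw [hklen, pvAiter]
      · exact List.Pairwise.sublist (List.eraseIdx_sublist l _) hp
      · rw [List.length_eraseIdx, if_pos hplt]; omega
    · rw [pvALoop_stop _ _ _ hlen]
      have : l.length - n.toNat = 0 := by simp at hlen; omega
      rw [this]
      simp [pvAiter]

theorem pv_self_eq_map_range (bf : List (List (String × List (List (String × Int))))) :
    bf = (List.range bf.length).map (pvG bf) := by
  apply List.ext_getElem (by simp)
  intro i h1 h2
  simp [pvG, List.getElem?_eq_getElem h1]

theorem A_char (bf : List (List (String × List (List (String × Int))))) (n : Int) (hn : 0 ≤ n) :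
    getOnlyNFramesFaces bf n
      = ((List.range bf.length).filter
          (fun i => decide (bf.length - n.toNat ≤ pvRank (pvS bf) bf.length i))).map (pvG bf) := by
  rw [getOnlyNFramesFaces]
  rw [show pvALoop bf.length bf n = pvALoop bf.length ((List.range bf.length).map (pvG bf)) n from
    by rw [← pv_self_eq_map_range bf]]
  rw [pvALoop_eq (pvG bf) n hn bf.length (List.range bf.length)
      List.pairwise_lt_range (by simp; omega)]
  have hup : (fun j => pvC (pvG bf j)) = pvS bf := rfl
  rw [hup]
  rw [pvAiter_eq (pvS bf) (pvS_nonneg bf) _ _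
      List.pairwise_lt_range (by simp)]
  simp [pvRank]

-- -------- B's sort characterisation --------
-- "a comes before b in B's sort order"
def pvLex (key : Int → Int) (a b : Int) : Bool := decide (key a < key b ∨ (key a = key b ∧ a < b))

theorem pvLex_trans (key : Int → Int) {a b c : Int}
    (h1 : pvLex key a b = true) (h2 : pvLex key b c = true) : pvLex key a c = true := by
  simp only [pvLex, decide_eq_true_eq] at *
  rcases h1 with h1 | ⟨h1, h1'⟩ <;> rcases h2 with h2 | ⟨h2, h2'⟩ <;> [left; left; left; right] <;> omega

theorem pv_insertBy_pairwise {α : Type} (R : α → α → Prop)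
    (htrans : ∀ {a b c}, R a b → R b c → R a c)
    (before : α → α → Bool) (x : α) (ys : List α) (hys : ys.Pairwise R)
    (h1 : ∀ y ∈ ys, before x y = true → R x y)
    (h2 : ∀ y ∈ ys, before x y = false → R y x) :
    (PySem.List.insertBy before x ys).Pairwise R := by
  induction ys with
  | nil => simp [PySem.List.insertBy]
  | cons y t ih =>
    rw [List.pairwise_cons] at hys
    rw [PySem.List.insertBy]
    by_cases hb : before x y = true
    · rw [if_pos hb]
      refine List.Pairwise.cons ?_ (List.Pairwise.cons hys.1 hys.2)
      intro z hz
      rcases List.mem_cons.mp hz with hzy | hz'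
      · rw [hzy]; exact h1 y List.mem_cons_self hb
      · exact htrans (h1 y List.mem_cons_self hb) (hys.1 z hz')
    · rw [if_neg hb]
      refine List.Pairwise.cons ?_ (ih hys.2
        (fun z hz h => h1 z (List.mem_cons_of_mem _ hz) h)
        (fun z hz h => h2 z (List.mem_cons_of_mem _ hz) h))
      intro z hz
      rcases (PySem.List.mem_insertBy before x z t).mp hz with hzx | hz'
      · rw [hzx]; exact h2 y List.mem_cons_self (by simpa using hb)
      · exact hys.1 z hz'

theorem pv_sorted_fold_pairwise (key : Int → Int) :
    ∀ (l acc : List Int), l.Pairwise (· < ·) → acc.Pairwise (fun a b => pvLex key a b = true) →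
      (∀ y ∈ acc, ∀ x ∈ l, y < x) →
      (l.foldl (fun acc x => PySem.List.insertBy (fun a b => decide (key a < key b)) x acc) acc).Pairwise
        (fun a b => pvLex key a b = true) := by
  intro l
  induction l with
  | nil => intro acc _ hacc _; simpa using hacc
  | cons x t ih =>
    intro acc hp hacc hord
    rw [List.pairwise_cons] at hp
    simp only [List.foldl_cons]
    apply ih _ hp.2
    · apply pv_insertBy_pairwise (R := fun a b => pvLex key a b = true)
        (fun h1 h2 => pvLex_trans key h1 h2) _ _ _ hacc
      · intro y hy hb
        simp only [decide_eq_true_eq] at hb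
        simp [pvLex, hb]
      · intro y hy hb
        simp only [decide_eq_false_iff_not, not_lt] at hb
        have : y < x := hord y hy x List.mem_cons_self
        simp only [pvLex, decide_eq_true_eq]
        rcases lt_or_eq_of_le hb with h | h
        · left; exact h
        · right; exact ⟨h, this⟩
    · intro y hy x' hx'
      rcases (PySem.List.mem_insertBy _ _ _ _).mp hy with hyx | hy'
      · rw [hyx]; exact hp.1 x' hx'
      · exact hord y hy' x' (List.mem_cons_of_mem _ hx')

theorem pv_sorted_pairwise_lex (key : Int → Int) (rng : List Int) (hp : rng.Pairwise (· < ·)) :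
    (PySem.List.sorted rng key false).Pairwise (fun a b => pvLex key a b = true) := by
  rw [PySem.List.sorted_eq_foldl_insertBy]
  exact pv_sorted_fold_pairwise key rng [] hp (by simp) (by simp)

-- -------- take / rank --------
theorem pv_take_mem_iff {α : Type} [DecidableEq α] (Rb : α → α → Bool) :
    ∀ (l : List α), l.Pairwise (fun a b => Rb a b = true) → l.Nodup →
      (∀ a b, Rb a b = true → Rb b a = false) →
      ∀ (k : Nat) (x : α), x ∈ l → (x ∈ l.take k ↔ l.countP (fun y => Rb y x) < k) := by
  intro l
  induction l with
  | nil => intro _ _ _ k x hx; simp at hx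
  | cons h t ih =>
    intro hp hnd hasym k x hx
    rw [List.pairwise_cons] at hp
    rw [List.nodup_cons] at hnd
    cases k with
    | zero =>
      simp
    | succ k =>
      rcases List.mem_cons.mp hx with rfl | hxt
      · have hcz : (x :: t).countP (fun y => Rb y x) = 0 := by
          rw [List.countP_eq_zero]
          intro y hy hb
          rcases List.mem_cons.mp hy with rfl | hyt
          · have h2 := hasym y y hb
            rw [h2] at hb
            cases hb
          · have h2 := hasym x y (hp.1 y hyt)
            rw [h2] at hb
            cases hb
        simp [hcz]
      · have hxh : x ≠ h := fun he => hnd.1 (he ▸ hxt)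
        have hcount : (h :: t).countP (fun y => Rb y x) = t.countP (fun y => Rb y x) + 1 := by
          rw [List.countP_cons]
          simp [hp.1 x hxt]
        rw [List.take_succ_cons, List.mem_cons, hcount]
        rw [ih hp.2 hnd.2 hasym k x hxt]
        constructor
        · rintro (rfl | hm)
          · exact absurd rfl hxh
          · omega
        · intro hm; right; omega

theorem pvLex_asym (key : Int → Int) (a b : Int) (h : pvLex key a b = true) : pvLex key b a = false := by
  simp only [pvLex, decide_eq_true_eq, decide_eq_false_iff_not] at *
  omega

-- -------- B characterisation --------
theorem pv_contains_ofList (xs : List Int) (y : Int) :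
    PySem.Set.contains (PySem.Set.ofList xs) y = decide (y ∈ xs) := by
  rw [Bool.eq_iff_iff]
  simp [PySem.Set.contains, PySem.Set.mem_ofList]

theorem B_char (bf : List (List (String × List (List (String × Int))))) (n : Int)
    (hn : 0 ≤ n) (hlen : n < (bf.length : Int)) :
    getOnlyNFramesFaces_alt bf n
      = ((List.range bf.length).filter
          (fun i => decide (bf.length - n.toNat ≤ pvRank (pvS bf) bf.length i))).map (pvG bf) := by
  have hL0 : (0 : Int) < (bf.length : Int) - n := by omega
  simp only [getOnlyNFramesFaces_alt]
  rw [if_pos hL0]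
  set L := bf.length with hLdef
  set key := pvKey (bf.map pvScore) with hkeydef
  set rng := PySem.List.pyRange 0 (L : Int) 1 with hrngdef
  set order := PySem.List.sorted rng key false with horddef
  set K := ((L : Int) - n).toNat with hKdef
  have hlen' : n < (L : Int) := hlen
  have hrng : rng = (List.range L).map (fun k : Nat => (k : Int)) :=
    PySem.List.pyRange_zero_natCast L
  have hrngp : rng.Pairwise (· < ·) := by
    rw [hrng, List.pairwise_map]
    exact List.pairwise_lt_range.imp (fun h => by exact_mod_cast h)
  have hordp := pv_sorted_pairwise_lex key rng hrngp
  have hperm : order.Perm rng := PySem.List.sorted_perm rng key false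
  have hndr : rng.Nodup := by
    rw [hrng]
    exact List.nodup_range.map (fun a b h => by exact_mod_cast h)
  have hndo : order.Nodup := (hperm.nodup_iff).mpr hndr
  have hKeq : K = L - n.toNat := by omega
  have hkey : ∀ a : Nat, a < L → key (a : Int) = -(pvS bf a) := by
    intro a ha
    have ha' : a < (bf.map pvScore).length := by simpa using ha
    rw [hkeydef, pvKey, PySem.List.pyGet?_natCast, List.getElem?_eq_getElem ha']
    simp [pvScore_eq_pvC, pvS, pvG,
      List.getElem?_eq_getElem (show a < bf.length from ha)]
  have hcnt : ∀ j : Nat, j < L → order.countP (fun y => pvLex key y (j : Int)) = pvRank (pvS bf) L j := by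
    intro j hj
    rw [hperm.countP_eq, hrng, List.countP_map, pvRank]
    apply List.countP_congr
    intro a ha
    have haL : a < L := List.mem_range.mp ha
    simp only [Function.comp_apply, pvLex, pvPrio, decide_eq_true_eq]
    rw [hkey a haL, hkey j hj]
    omega
  have hmemtake : ∀ j : Nat, j < L → ((j : Int) ∈ order.take K ↔ pvRank (pvS bf) L j < K) := by
    intro j hj
    have hjr : (j : Int) ∈ rng := by
      rw [hrng]; exact List.mem_map_of_mem (List.mem_range.mpr hj)
    have hjo : (j : Int) ∈ order := hperm.mem_iff.mpr hjr
    rw [pv_take_mem_iff (pvLex key) order hordp hndo (pvLex_asym key) K _ hjo, hcnt j hj]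
  rw [hrng, List.filter_map, List.map_map]
  rw [List.filter_congr (q := fun j => decide (L - n.toNat ≤ pvRank (pvS bf) L j))
    (by
      intro j hjr
      have hj : j < L := List.mem_range.mp hjr
      simp only [Function.comp_apply, pv_contains_ofList]
      rw [Bool.eq_iff_iff]
      simp only [Bool.not_eq_eq_eq_not, Bool.not_true, decide_eq_false_iff_not,
        decide_eq_true_eq]
      rw [hmemtake j hj]
      omega)]
  apply List.map_congr_left
  intro j hjf
  have hj : j < L := List.mem_range.mp (List.mem_of_mem_filter hjf)
  simp only [Function.comp_apply]
  rw [PySem.List.pyGet?_natCast, List.getElem?_eq_getElem hj]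
  simp [pvG, List.getElem?_eq_getElem (show j < bf.length from hj)]

-- -------- assembly --------

-- ===== VERDICT =====
theorem getOnlyNFramesFaces_spec : Claim_equal_getOnlyNFramesFaces := by
  intro bf n _hdom hpre
  rw [Spec_getOnlyNFramesFaces]
  obtain ⟨hn, -⟩ := hpre
  by_cases hlen : n < (bf.length : Int)
  · rw [A_char bf n hn, B_char bf n hn hlen]
  · rw [getOnlyNFramesFaces, pvALoop_stop _ _ _ hlen, getOnlyNFramesFaces_alt]
    have : ¬ (0 : Int) < (bf.length : Int) - n := by omega
    simp only [this, if_false]
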